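-- pv_equiv track=rewrite | github.com/zalepa/aoc2023 | day02/day02.py | valid_turn
-- ===== SOURCE A (Python) =====
-- def valid_turn(turn):
--   for t in turn:
--     if t[0] == 'red' and t[1] > 12:
--       return False
--     if t[0] == 'green' and t[1] > 13:
--       return False
--     if t[0] == 'blue' and t[1] > 14:
--       return False
--   return True
-- ===== SOURCE B (Python) =====
-- def valid_turn(turn):
--   maxes = {}
--   for color, count in turn:
--     maxes[color] = max(maxes.get(color, 0), count)
--   return maxes.get('red', 0) <= 12 and maxes.get('green', 0) <= 13 and maxes.get('blue', 0) <= 14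
-- ===== Notes on version B (the rewrite author's own statement) =====
-- stated objective: alternative
-- what changed: Replaces the scan-and-short-circuit loop with one aggregation pass building a dict of per-color maxima and a separate validation pass over the three limits.
import Mathlib
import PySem

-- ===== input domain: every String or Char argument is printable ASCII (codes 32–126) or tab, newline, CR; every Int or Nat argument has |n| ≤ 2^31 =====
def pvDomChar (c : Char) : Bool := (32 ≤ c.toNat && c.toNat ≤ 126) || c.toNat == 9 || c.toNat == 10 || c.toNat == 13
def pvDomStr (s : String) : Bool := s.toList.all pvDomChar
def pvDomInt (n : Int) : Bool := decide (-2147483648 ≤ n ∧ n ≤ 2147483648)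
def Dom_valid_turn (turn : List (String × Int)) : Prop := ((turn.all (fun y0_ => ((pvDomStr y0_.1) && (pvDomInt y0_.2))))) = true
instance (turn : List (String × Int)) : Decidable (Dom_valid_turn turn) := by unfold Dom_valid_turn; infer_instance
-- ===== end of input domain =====

-- B replaces A's scan-and-short-circuit loop with an aggregation pass building per-color maxima
-- and a separate validation pass over the three limits (alternative decomposition, same cost).

-- ===== PORT A =====
-- early-return loop, transliterated as structural recursion
def valid_turn (turn : List (String × Int)) : Bool :=
  match turn with
  | [] => true
  | t :: rest =>
    if t.1 == "red" && decide (t.2 > 12) then false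
    else if t.1 == "green" && decide (t.2 > 13) then false
    else if t.1 == "blue" && decide (t.2 > 14) then false
    else valid_turn rest

-- ===== PORT B =====
def valid_turn_alt (turn : List (String × Int)) : Bool :=
  let maxes := turn.foldl
    (fun (m : PySem.Dict String Int) (t : String × Int) =>
      m.insert t.1 (max (m.getD t.1 0) t.2)) PySem.Dict.empty
  decide (maxes.getD "red" 0 ≤ 12) && decide (maxes.getD "green" 0 ≤ 13)
    && decide (maxes.getD "blue" 0 ≤ 14)

-- ===== PRECONDITION & SPEC =====
def Spec_valid_turn (turn : List (String × Int)) (out : Bool) : Prop := out = valid_turn_alt turn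
instance (turn : List (String × Int)) (out : Bool) : Decidable (Spec_valid_turn turn out) := by unfold Spec_valid_turn; infer_instance

-- ===== CLAIM (what is proved, stated in full; the proofs are below) =====
def Claim_equal_valid_turn : Prop := ∀ (turn : List (String × Int)), Dom_valid_turn turn → Spec_valid_turn turn (valid_turn turn)

-- ===== LEMMAS AND PROOFS =====

-- The folded max-dict's entry at c is ≤ L iff the starting entry is and every count for color c is.
theorem maxes_getD_le (turn : List (String × Int)) (m : PySem.Dict String Int)
    (c : String) (L : Int) :
    (turn.foldl (fun (m : PySem.Dict String Int) (t : String × Int) =>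
      m.insert t.1 (max (m.getD t.1 0) t.2)) m).getD c 0 ≤ L
    ↔ (m.getD c 0 ≤ L ∧ ∀ t ∈ turn, t.1 = c → t.2 ≤ L) := by
  induction turn generalizing m with
  | nil => simp
  | cons t rest ih =>
    rw [List.foldl_cons, ih, PySem.Dict.getD_insert]
    by_cases h : c = t.1
    · subst h
      rw [if_pos rfl, max_le_iff]
      constructor
      · rintro ⟨⟨h1, h2⟩, h3⟩
        refine ⟨h1, fun s hs hc => ?_⟩
        rcases List.mem_cons.mp hs with e | hm
        · exact e ▸ h2
        · exact h3 s hm hc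
      · rintro ⟨h1, h2⟩
        exact ⟨⟨h1, h2 t (List.mem_cons_self) rfl⟩,
          fun s hm hc => h2 s (List.mem_cons_of_mem _ hm) hc⟩
    · rw [if_neg h]
      constructor
      · rintro ⟨h1, h2⟩
        refine ⟨h1, fun s hs hc => ?_⟩
        rcases List.mem_cons.mp hs with e | hm
        · exact absurd (e ▸ hc) (fun hh => h hh.symm)
        · exact h2 s hm hc
      · rintro ⟨h1, h2⟩
        exact ⟨h1, fun s hm hc => h2 s (List.mem_cons_of_mem _ hm) hc⟩

theorem valid_turn_iff (turn : List (String × Int)) :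
    valid_turn turn = true ↔ ∀ t ∈ turn,
      (t.1 = "red" → t.2 ≤ 12) ∧ (t.1 = "green" → t.2 ≤ 13) ∧ (t.1 = "blue" → t.2 ≤ 14) := by
  induction turn with
  | nil => simp [valid_turn]
  | cons t rest ih =>
    simp only [valid_turn, List.mem_cons]
    split_ifs with h1 h2 h3
    · simp only [Bool.and_eq_true, beq_iff_eq, decide_eq_true_eq] at h1
      simp only [false_iff]
      exact fun h => absurd ((h t (Or.inl rfl)).1 h1.1) (by omega)
    · simp only [Bool.and_eq_true, beq_iff_eq, decide_eq_true_eq] at h2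
      simp only [false_iff]
      exact fun h => absurd ((h t (Or.inl rfl)).2.1 h2.1) (by omega)
    · simp only [Bool.and_eq_true, beq_iff_eq, decide_eq_true_eq] at h3
      simp only [false_iff]
      exact fun h => absurd ((h t (Or.inl rfl)).2.2 h3.1) (by omega)
    · simp only [Bool.and_eq_true, beq_iff_eq, decide_eq_true_eq, not_and, not_lt] at h1 h2 h3
      rw [ih]
      constructor
      · intro h
        refine fun s hs => hs.elim (fun e => e ▸ ⟨h1, h2, h3⟩) (fun hm => h s hm)
      · exact fun h s hm => h s (Or.inr hm)

theorem valid_turn_alt_iff (turn : List (String × Int)) :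
    valid_turn_alt turn = true ↔ ∀ t ∈ turn,
      (t.1 = "red" → t.2 ≤ 12) ∧ (t.1 = "green" → t.2 ≤ 13) ∧ (t.1 = "blue" → t.2 ≤ 14) := by
  simp only [valid_turn_alt, Bool.and_eq_true, decide_eq_true_eq]
  rw [maxes_getD_le, maxes_getD_le, maxes_getD_le]
  simp only [PySem.Dict.getD_empty]
  constructor
  · intro h t ht
    exact ⟨fun hc => h.1.1.2 t ht hc, fun hc => h.1.2.2 t ht hc, fun hc => h.2.2 t ht hc⟩
  · intro h
    exact ⟨⟨⟨by norm_num, fun t ht hc => (h t ht).1 hc⟩,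
      by norm_num, fun t ht hc => (h t ht).2.1 hc⟩,
      by norm_num, fun t ht hc => (h t ht).2.2 hc⟩

-- ===== VERDICT (by name: the statement is the Claim_ definition above) =====
theorem valid_turn_spec : Claim_equal_valid_turn := by
  intro turn _
  unfold Spec_valid_turn
  rw [Bool.eq_iff_iff, valid_turn_iff, valid_turn_alt_iff]
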